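-- pv_equiv track=rewrite | github.com/Vineyardcode/voynich_slop | scripts/phase79_gallows_collapse.py | collapse_compound_to_simple
-- ===== SOURCE A (Python) =====
-- GALLOWS_TRI = ['cth', 'ckh', 'cph', 'cfh']
--
-- GALLOWS_BI  = ['ch', 'sh', 'th', 'kh', 'ph', 'fh']
--
-- def eva_to_glyphs(word):
--     glyphs = []
--     i = 0
--     w = word.lower()
--     while i < len(w):
--         if i + 2 < len(w) and w[i:i+3] in GALLOWS_TRI:
--             glyphs.append(w[i:i+3]); i += 3
--         elif i + 1 < len(w) and w[i:i+2] in GALLOWS_BI: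
--             glyphs.append(w[i:i+2]); i += 2
--         else:
--             glyphs.append(w[i]); i += 1
--     return glyphs
--
-- def glyphs_to_word(glyphs):
--     return ''.join(glyphs)
--
-- def collapse_compound_to_simple(word):
--     """Replace compound gallows with simple+ch: cph→p+ch, cth→t+ch etc."""
--     glyphs = eva_to_glyphs(word)
--     new = []
--     for g in glyphs:
--         if g == 'cph': new.extend(['p', 'ch'])
--         elif g == 'cfh': new.extend(['f', 'ch'])
--         elif g == 'cth': new.extend(['t', 'ch'])
--         elif g == 'ckh': new.extend(['k', 'ch'])
--         else: new.append(g)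
--     return glyphs_to_word(new)
-- ===== SOURCE B (Python) =====
-- def collapse_compound_to_simple(word):
--     """Replace compound gallows with simple+ch: cph->p+ch, cth->t+ch etc."""
--     w = word.lower()
--     for compound, simple in (('cph', 'pch'), ('cfh', 'fch'), ('cth', 'tch'), ('ckh', 'kch')):
--         w = w.replace(compound, simple)
--     return w
-- ===== Notes on version B (the rewrite author's own statement) =====
-- stated objective: idiomatic
-- what changed: Replaces the hand-written greedy glyph tokenizer + per-glyph rewrite + join with four chained str.replace calls on the lowercased word; correct because the four compound trigraphs cannot overlap one another, a bigraph glyph never swallows the start of a trigraph, and the replacements create no new trigraph.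
import Mathlib
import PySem

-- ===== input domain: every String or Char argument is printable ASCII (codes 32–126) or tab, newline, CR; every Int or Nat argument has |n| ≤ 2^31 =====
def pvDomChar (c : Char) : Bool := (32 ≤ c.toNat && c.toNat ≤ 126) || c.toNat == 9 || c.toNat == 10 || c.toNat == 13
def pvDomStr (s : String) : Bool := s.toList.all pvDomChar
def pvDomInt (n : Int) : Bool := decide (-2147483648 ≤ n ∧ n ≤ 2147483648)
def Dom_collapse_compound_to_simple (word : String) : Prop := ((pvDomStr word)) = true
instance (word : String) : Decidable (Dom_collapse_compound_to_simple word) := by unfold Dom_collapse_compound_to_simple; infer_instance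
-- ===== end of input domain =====

-- B replaces A's greedy glyph tokenizer + per-glyph rewrite + join with four chained
-- str.replace calls on the lowercased word (idiomatic; same result, proved below).

-- ===== PORT A =====
def pvGALLOWS_TRI : List (List Char) := [['c','t','h'], ['c','k','h'], ['c','p','h'], ['c','f','h']]
def pvGALLOWS_BI : List (List Char) := [['c','h'], ['s','h'], ['t','h'], ['k','h'], ['p','h'], ['f','h']]

-- the while loop of eva_to_glyphs, as recursion on the remaining characters w[i:]
-- (i + 2 < len(w) means at least 3 characters remain; w[i:i+3] is `take 3` of the rest)
def pvEvaGo (l : List Char) : List (List Char) :=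
  match l with
  | [] => []
  | c :: t =>
    if 3 ≤ (c :: t).length ∧ (c :: t).take 3 ∈ pvGALLOWS_TRI then
      (c :: t).take 3 :: pvEvaGo (t.drop 2)
    else if 2 ≤ (c :: t).length ∧ (c :: t).take 2 ∈ pvGALLOWS_BI then
      (c :: t).take 2 :: pvEvaGo (t.drop 1)
    else
      [c] :: pvEvaGo t
termination_by l.length
decreasing_by all_goals (simp; try omega)

def pvEvaToGlyphs (word : String) : List (List Char) :=
  pvEvaGo (PySem.Chars.lower word.toList)

def collapse_compound_to_simple (word : String) : String :=
  let glyphs := pvEvaToGlyphs word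
  let new := glyphs.foldl (fun acc g =>
    if g = ['c','p','h'] then acc ++ [['p'], ['c','h']]
    else if g = ['c','f','h'] then acc ++ [['f'], ['c','h']]
    else if g = ['c','t','h'] then acc ++ [['t'], ['c','h']]
    else if g = ['c','k','h'] then acc ++ [['k'], ['c','h']]
    else acc ++ [g]) []
  String.ofList (PySem.Chars.join [] new)

-- ===== PORT B =====
def collapse_compound_to_simple_alt (word : String) : String :=
  let pairs : List (String × String) := [("cph", "pch"), ("cfh", "fch"), ("cth", "tch"), ("ckh", "kch")]
  pairs.foldl (fun w p => PySem.Str.replace w p.1 p.2) (PySem.Str.lower word)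

-- ===== PRECONDITION & SPEC =====
def Spec_collapse_compound_to_simple (word : String) (out : String) : Prop := out = collapse_compound_to_simple_alt word
instance (word : String) (out : String) : Decidable (Spec_collapse_compound_to_simple word out) := by unfold Spec_collapse_compound_to_simple; infer_instance

-- ===== CLAIM (what is proved, stated in full; the proofs are below) =====
def Claim_equal_collapse_compound_to_simple : Prop := ∀ (word : String), Dom_collapse_compound_to_simple word → Spec_collapse_compound_to_simple word (collapse_compound_to_simple word)

-- ===== LEMMAS AND PROOFS =====

-- single-pattern greedy rewrite: the structural form of str.replace for a nonempty pattern
def pvRwg (old new : List Char) (l : List Char) : List Char :=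
  match l with
  | [] => []
  | c :: t =>
    if old.isPrefixOf (c :: t) then new ++ pvRwg old new (t.drop (old.length - 1))
    else c :: pvRwg old new t
termination_by l.length
decreasing_by all_goals (simp; try omega)

-- the combined one-pass trigraph rewrite that both pipelines compute
def pvR (l : List Char) : List Char :=
  match l with
  | 'c' :: x :: 'h' :: t =>
    if x = 'p' ∨ x = 'f' ∨ x = 't' ∨ x = 'k' then x :: 'c' :: 'h' :: pvR t
    else 'c' :: pvR (x :: 'h' :: t)
  | c :: t => c :: pvR t
  | [] => []
termination_by l.length
decreasing_by all_goals (simp; try omega)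

def pvRw1 (x : Char) (l : List Char) : List Char := pvRwg ['c', x, 'h'] [x, 'c', 'h'] l

theorem pvRwg_eq_go (old new : List Char) (hold : old ≠ []) :
    ∀ (fuel : Nat) (l acc : List Char), l.length ≤ fuel →
      PySem.Chars.replace.go old new fuel l acc = acc.reverse ++ pvRwg old new l := by
  intro fuel
  induction fuel with
  | zero =>
    intro l acc h
    have : l = [] := by cases l <;> simp_all
    subst this; simp [PySem.Chars.replace.go, pvRwg]
  | succ n ih =>
    intro l acc h
    cases l with
    | nil => simp [PySem.Chars.replace.go, pvRwg]
    | cons c t =>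
      simp only [List.length_cons] at h
      rw [PySem.Chars.replace.go]
      by_cases hp : old.isPrefixOf (c :: t)
      · have hdrop : (c :: t).drop old.length = t.drop (old.length - 1) := by
          cases old with
          | nil => exact absurd rfl hold
          | cons o os => simp
        simp only [hp, if_true, hdrop]
        rw [ih (t.drop (old.length - 1)) (new.reverse ++ acc) (by simp; omega)]
        rw [pvRwg]
        simp [hp]
      · simp only [hp]
        rw [ih t (c :: acc) (by omega)]
        rw [pvRwg]
        simp [hp]

theorem replace_eq_pvRwg (s old new : List Char) (hold : old ≠ []) :
    PySem.Chars.replace s old new = pvRwg old new s := by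
  rw [PySem.Chars.replace]
  simp [List.isEmpty_iff, hold]
  rw [pvRwg_eq_go old new hold s.length s [] le_rfl]
  simp

-- step over a head that is not 'c'
theorem pvRw1_cons_ne (x c : Char) (t : List Char) (hc : c ≠ 'c') :
    pvRw1 x (c :: t) = c :: pvRw1 x t := by
  rw [pvRw1, pvRwg]
  simp [List.isPrefixOf, Ne.symm hc]
  rfl

-- the pattern fires
theorem pvRw1_hit (x : Char) (t : List Char) :
    pvRw1 x ('c' :: x :: 'h' :: t) = x :: 'c' :: 'h' :: pvRw1 x t := by
  rw [pvRw1, pvRwg]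
  simp [List.isPrefixOf]
  rfl

-- head is 'c' but the tail does not continue the pattern
theorem pvRw1_miss (x : Char) (t : List Char) (h : ¬ [x, 'h'].isPrefixOf t = true) :
    pvRw1 x ('c' :: t) = 'c' :: pvRw1 x t := by
  rw [pvRw1, pvRwg]
  simp [List.isPrefixOf] at h ⊢
  simp [h, pvRw1]

-- a leading 'h' survives the rewrite (x is never 'h')
theorem pvRw1_head_h (x : Char) (t : List Char) (hxh : x ≠ 'h') :
    ['h'].isPrefixOf (pvRw1 x t) = ['h'].isPrefixOf t := by
  cases t with
  | nil => simp [pvRw1, pvRwg]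
  | cons d ds =>
    rw [pvRw1, pvRwg]
    by_cases hp : ['c', x, 'h'].isPrefixOf (d :: ds)
    · simp [List.isPrefixOf] at hp
      simp [hp, List.isPrefixOf, Ne.symm hxh, ← hp.1]
    · rw [if_neg hp]
      simp [List.isPrefixOf]

-- rewriting 'c'x'h' neither creates nor destroys a leading "yh" (y ≠ 'c', y ≠ x, x ≠ 'h')
theorem pvRw1_pfx (x y : Char) (l : List Char) (hyc : y ≠ 'c') (hyx : y ≠ x) (hxh : x ≠ 'h') :
    [y, 'h'].isPrefixOf (pvRw1 x l) = [y, 'h'].isPrefixOf l := by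
  have hyx' : (y == x) = false := by simp [hyx]
  have hyc' : (y == 'c') = false := by simp [hyc]
  cases l with
  | nil => simp [pvRw1, pvRwg]
  | cons c t =>
    by_cases hc : c = 'c'
    · subst hc
      by_cases hp2 : [x, 'h'].isPrefixOf t
      · obtain ⟨t', rfl⟩ : ∃ t', [x, 'h'] ++ t' = t := List.isPrefixOf_iff_prefix.mp hp2
        rw [show ([x, 'h'] ++ t' : List Char) = x :: 'h' :: t' from rfl] at *
        rw [pvRw1_hit]
        simp [List.isPrefixOf, hyx', hyc']
      · rw [pvRw1_miss x t hp2]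
        simp only [List.isPrefixOf_cons₂]
        rw [pvRw1_head_h x t hxh]
    · rw [pvRw1_cons_ne x c t hc]
      simp only [List.isPrefixOf_cons₂]
      rw [pvRw1_head_h x t hxh]

theorem pvR_cons_ne (c : Char) (t : List Char) (hc : c ≠ 'c') : pvR (c :: t) = c :: pvR t := by
  rw [pvR.eq_def]
  split
  · next heq => injection heq with h1 _; exact absurd h1 hc
  · next heq => injection heq with h1 h2; rw [h1, h2]
  · next heq => exact absurd heq (by simp)

theorem pvR_hit (x : Char) (t : List Char) (hx : x = 'p' ∨ x = 'f' ∨ x = 't' ∨ x = 'k') :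
    pvR ('c' :: x :: 'h' :: t) = x :: 'c' :: 'h' :: pvR t := by
  rw [pvR]
  simp [hx]

theorem pvR_c_cons (t : List Char)
    (hp : ¬ ['p','h'].isPrefixOf t = true) (hf : ¬ ['f','h'].isPrefixOf t = true)
    (ht : ¬ ['t','h'].isPrefixOf t = true) (hk : ¬ ['k','h'].isPrefixOf t = true) :
    pvR ('c' :: t) = 'c' :: pvR t := by
  rcases t with _ | ⟨x, _ | ⟨y, r⟩⟩
  · simp [pvR]
  · rw [pvR.eq_def]
    split
    · next heq => exact absurd heq (by simp)
    · next heq => injection heq with h1 h2; rw [h1, h2]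
    · next heq => exact absurd heq (by simp)
  · by_cases hy : y = 'h'
    · subst hy
      have hx : ¬ (x = 'p' ∨ x = 'f' ∨ x = 't' ∨ x = 'k') := by
        rintro (rfl | rfl | rfl | rfl) <;> simp [List.isPrefixOf] at hp hf ht hk
      rw [pvR]
      simp [hx]
    · rw [pvR.eq_def]
      split
      · next heq =>
        injection heq with h1 h2; injection h2 with h2 h3; injection h3 with h3 _
        exact absurd h3 hy
      · next heq => injection heq with h1 h2; rw [h1, h2]
      · next heq => exact absurd heq (by simp)

-- the four chained single-pattern rewrites compute the combined one-pass rewrite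
theorem comp_eq_pvR (s : List Char) :
    pvRw1 'k' (pvRw1 't' (pvRw1 'f' (pvRw1 'p' s))) = pvR s := by
  match s with
  | [] => simp [pvRw1, pvRwg, pvR]
  | c :: t =>
    by_cases hc : c = 'c'
    case neg =>
      rw [pvRw1_cons_ne 'p' c t hc, pvRw1_cons_ne 'f' c _ hc, pvRw1_cons_ne 't' c _ hc,
          pvRw1_cons_ne 'k' c _ hc, pvR_cons_ne c t hc, comp_eq_pvR t]
    case pos =>
      subst hc
      by_cases hp : ['p','h'].isPrefixOf t = true
      · obtain ⟨t', rfl⟩ : ∃ t', ['p','h'] ++ t' = t := List.isPrefixOf_iff_prefix.mp hp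
        simp only [List.cons_append, List.nil_append]
        rw [pvRw1_hit 'p' t']
        rw [pvRw1_cons_ne 'f' 'p' _ (by decide), pvRw1_miss 'f' _ (by simp [List.isPrefixOf]),
            pvRw1_cons_ne 'f' 'h' _ (by decide)]
        rw [pvRw1_cons_ne 't' 'p' _ (by decide), pvRw1_miss 't' _ (by simp [List.isPrefixOf]),
            pvRw1_cons_ne 't' 'h' _ (by decide)]
        rw [pvRw1_cons_ne 'k' 'p' _ (by decide), pvRw1_miss 'k' _ (by simp [List.isPrefixOf]),
            pvRw1_cons_ne 'k' 'h' _ (by decide)]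
        rw [pvR_hit 'p' t' (by simp), comp_eq_pvR t']
      · by_cases hf : ['f','h'].isPrefixOf t = true
        · obtain ⟨t', rfl⟩ : ∃ t', ['f','h'] ++ t' = t := List.isPrefixOf_iff_prefix.mp hf
          simp only [List.cons_append, List.nil_append]
          rw [pvRw1_miss 'p' _ (by simp [List.isPrefixOf]), pvRw1_cons_ne 'p' 'f' _ (by decide),
              pvRw1_cons_ne 'p' 'h' _ (by decide)]
          rw [pvRw1_hit 'f' _]
          rw [pvRw1_cons_ne 't' 'f' _ (by decide), pvRw1_miss 't' _ (by simp [List.isPrefixOf]),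
              pvRw1_cons_ne 't' 'h' _ (by decide)]
          rw [pvRw1_cons_ne 'k' 'f' _ (by decide), pvRw1_miss 'k' _ (by simp [List.isPrefixOf]),
              pvRw1_cons_ne 'k' 'h' _ (by decide)]
          rw [pvR_hit 'f' t' (by simp), comp_eq_pvR t']
        · by_cases ht : ['t','h'].isPrefixOf t = true
          · obtain ⟨t', rfl⟩ : ∃ t', ['t','h'] ++ t' = t := List.isPrefixOf_iff_prefix.mp ht
            simp only [List.cons_append, List.nil_append]
            rw [pvRw1_miss 'p' _ (by simp [List.isPrefixOf]), pvRw1_cons_ne 'p' 't' _ (by decide),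
                pvRw1_cons_ne 'p' 'h' _ (by decide)]
            rw [pvRw1_miss 'f' _ (by simp [List.isPrefixOf]), pvRw1_cons_ne 'f' 't' _ (by decide),
                pvRw1_cons_ne 'f' 'h' _ (by decide)]
            rw [pvRw1_hit 't' _]
            rw [pvRw1_cons_ne 'k' 't' _ (by decide), pvRw1_miss 'k' _ (by simp [List.isPrefixOf]),
                pvRw1_cons_ne 'k' 'h' _ (by decide)]
            rw [pvR_hit 't' t' (by simp), comp_eq_pvR t']
          · by_cases hk : ['k','h'].isPrefixOf t = true
            · obtain ⟨t', rfl⟩ : ∃ t', ['k','h'] ++ t' = t := List.isPrefixOf_iff_prefix.mp hk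
              simp only [List.cons_append, List.nil_append]
              rw [pvRw1_miss 'p' _ (by simp [List.isPrefixOf]), pvRw1_cons_ne 'p' 'k' _ (by decide),
                  pvRw1_cons_ne 'p' 'h' _ (by decide)]
              rw [pvRw1_miss 'f' _ (by simp [List.isPrefixOf]), pvRw1_cons_ne 'f' 'k' _ (by decide),
                  pvRw1_cons_ne 'f' 'h' _ (by decide)]
              rw [pvRw1_miss 't' _ (by simp [List.isPrefixOf]), pvRw1_cons_ne 't' 'k' _ (by decide),
                  pvRw1_cons_ne 't' 'h' _ (by decide)]
              rw [pvRw1_hit 'k' _]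
              rw [pvR_hit 'k' t' (by simp), comp_eq_pvR t']
            · rw [pvRw1_miss 'p' t hp]
              rw [pvRw1_miss 'f' _ (by rw [pvRw1_pfx 'p' 'f' t (by decide) (by decide) (by decide)]; exact hf)]
              rw [pvRw1_miss 't' _ (by rw [pvRw1_pfx 'f' 't' _ (by decide) (by decide) (by decide),
                    pvRw1_pfx 'p' 't' t (by decide) (by decide) (by decide)]; exact ht)]
              rw [pvRw1_miss 'k' _ (by rw [pvRw1_pfx 't' 'k' _ (by decide) (by decide) (by decide),
                    pvRw1_pfx 'f' 'k' _ (by decide) (by decide) (by decide),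
                    pvRw1_pfx 'p' 'k' t (by decide) (by decide) (by decide)]; exact hk)]
              rw [pvR_c_cons t hp hf ht hk, comp_eq_pvR t]
termination_by s.length
decreasing_by all_goals ((try subst t); simp; try omega)

-- ''.join is concatenation
theorem join_nil_flatten (parts : List (List Char)) : PySem.Chars.join [] parts = parts.flatten := by
  simp [PySem.Chars.join, List.intercalate]
  induction parts with
  | nil => simp
  | cons p ps ih =>
    cases ps with
    | nil => simp
    | cons q qs => simp_all [List.intersperse]

-- the per-glyph replacement of A's second loop, as a function
def pvF2 (g : List Char) : List (List Char) :=
  if g = ['c','p','h'] then [['p'], ['c','h']]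
  else if g = ['c','f','h'] then [['f'], ['c','h']]
  else if g = ['c','t','h'] then [['t'], ['c','h']]
  else if g = ['c','k','h'] then [['k'], ['c','h']]
  else [g]

theorem fold_eq_flatMap_pvF2 (glyphs : List (List Char)) (acc : List (List Char)) :
    glyphs.foldl (fun acc g =>
      if g = ['c','p','h'] then acc ++ [['p'], ['c','h']]
      else if g = ['c','f','h'] then acc ++ [['f'], ['c','h']]
      else if g = ['c','t','h'] then acc ++ [['t'], ['c','h']]
      else if g = ['c','k','h'] then acc ++ [['k'], ['c','h']]
      else acc ++ [g]) acc = acc ++ glyphs.flatMap pvF2 := by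
  induction glyphs generalizing acc with
  | nil => simp
  | cons g gs ih =>
    rw [List.foldl_cons, ih]
    have hstep : (if g = ['c','p','h'] then acc ++ [['p'], ['c','h']]
      else if g = ['c','f','h'] then acc ++ [['f'], ['c','h']]
      else if g = ['c','t','h'] then acc ++ [['t'], ['c','h']]
      else if g = ['c','k','h'] then acc ++ [['k'], ['c','h']]
      else acc ++ [g]) = acc ++ pvF2 g := by
      rw [pvF2]; split_ifs <;> rfl
    rw [hstep, List.flatMap_cons, List.append_assoc]

-- the tokenizer followed by the glyph replacement computes the one-pass rewrite
theorem eva_flat_eq_pvR (s : List Char) :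
    ((pvEvaGo s).flatMap pvF2).flatten = pvR s := by
  match s with
  | [] => simp [pvEvaGo, pvR]
  | c :: t =>
    rw [pvEvaGo]
    by_cases h3 : 3 ≤ (c :: t).length ∧ (c :: t).take 3 ∈ pvGALLOWS_TRI
    · rw [if_pos h3]
      obtain ⟨a, b, t₂, rfl⟩ : ∃ a b t₂, t = a :: b :: t₂ := by
        rcases t with _ | ⟨a, _ | ⟨b, t₂⟩⟩ <;> simp at h3 <;> try omega
        · exact ⟨a, b, t₂, rfl⟩
      have hmem := h3.2
      simp only [List.take, pvGALLOWS_TRI, List.mem_cons, List.mem_singleton,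
        List.not_mem_nil, or_false] at hmem
      simp only [List.drop]
      have step : ∀ (x : Char), x = 'p' ∨ x = 'f' ∨ x = 't' ∨ x = 'k' →
          ((List.flatMap pvF2 (List.take 3 ('c' :: x :: 'h' :: t₂) :: pvEvaGo t₂)).flatten
            = pvR ('c' :: x :: 'h' :: t₂)) := by
        intro x hx
        have hF : pvF2 (List.take 3 ('c' :: x :: 'h' :: t₂)) = [[x], ['c','h']] := by
          rcases hx with rfl | rfl | rfl | rfl <;> simp [pvF2]
        simp only [List.flatMap_cons, List.flatten_append, hF,
          List.flatten_cons, List.flatten_nil, List.append_nil, List.cons_append, List.nil_append]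
        rw [eva_flat_eq_pvR t₂, pvR_hit x t₂ hx]
      rcases hmem with h | h | h | h <;>
        simp only [List.cons.injEq, and_true] at h <;>
        obtain ⟨rfl, rfl, rfl⟩ := h
      · exact step 't' (by simp)
      · exact step 'k' (by simp)
      · exact step 'p' (by simp)
      · exact step 'f' (by simp)
    · rw [if_neg h3]
      by_cases h2 : 2 ≤ (c :: t).length ∧ (c :: t).take 2 ∈ pvGALLOWS_BI
      · rw [if_pos h2]
        obtain ⟨a, t₂, rfl⟩ : ∃ a t₂, t = a :: t₂ := by
          rcases t with _ | ⟨a, t₂⟩ <;> simp at h2 <;> try omega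
          exact ⟨a, t₂, rfl⟩
        have hmem := h2.2
        simp only [List.take, pvGALLOWS_BI, List.mem_cons, List.mem_singleton,
          List.not_mem_nil, or_false] at hmem
        simp only [List.drop]
        have step : ∀ (c1 c2 : Char),
            pvF2 [c1, c2] = [[c1, c2]] →
            pvR (c1 :: c2 :: t₂) = c1 :: c2 :: pvR t₂ →
            ((List.flatMap pvF2 (List.take 2 (c1 :: c2 :: t₂) :: pvEvaGo t₂)).flatten
              = pvR (c1 :: c2 :: t₂)) := by
          intro c1 c2 hF hR
          simp only [List.flatMap_cons, List.flatten_append, List.take, hF,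
            List.flatten_cons, List.flatten_nil, List.append_nil, List.cons_append, List.nil_append]
          rw [eva_flat_eq_pvR t₂, hR]
        have hch : pvR ('c' :: 'h' :: t₂) = 'c' :: 'h' :: pvR t₂ := by
          rw [pvR_c_cons ('h' :: t₂) (by simp [List.isPrefixOf]) (by simp [List.isPrefixOf])
              (by simp [List.isPrefixOf]) (by simp [List.isPrefixOf]),
              pvR_cons_ne 'h' t₂ (by decide)]
        rcases hmem with h | h | h | h | h | h <;>
          simp only [List.cons.injEq, and_true] at h <;>
          obtain ⟨rfl, rfl⟩ := h
        · exact step 'c' 'h' (by simp [pvF2]) hch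
        · exact step 's' 'h' (by simp [pvF2])
            (by rw [pvR_cons_ne 's' _ (by decide), pvR_cons_ne 'h' t₂ (by decide)])
        · exact step 't' 'h' (by simp [pvF2])
            (by rw [pvR_cons_ne 't' _ (by decide), pvR_cons_ne 'h' t₂ (by decide)])
        · exact step 'k' 'h' (by simp [pvF2])
            (by rw [pvR_cons_ne 'k' _ (by decide), pvR_cons_ne 'h' t₂ (by decide)])
        · exact step 'p' 'h' (by simp [pvF2])
            (by rw [pvR_cons_ne 'p' _ (by decide), pvR_cons_ne 'h' t₂ (by decide)])
        · exact step 'f' 'h' (by simp [pvF2])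
            (by rw [pvR_cons_ne 'f' _ (by decide), pvR_cons_ne 'h' t₂ (by decide)])
      · rw [if_neg h2]
        have hsingle : pvF2 [c] = [[c]] := by rw [pvF2]; split_ifs <;> simp_all
        simp only [List.flatMap_cons, List.flatten_append, hsingle,
          List.flatten_cons, List.flatten_nil, List.append_nil, List.cons_append, List.nil_append]
        rw [eva_flat_eq_pvR t]
        by_cases hc : c = 'c'
        · subst hc
          have hno : ∀ x, x = 'p' ∨ x = 'f' ∨ x = 't' ∨ x = 'k' → ¬ [x, 'h'].isPrefixOf t = true := by
            intro x hx hpre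
            obtain ⟨t', rfl⟩ : ∃ t', [x, 'h'] ++ t' = t := List.isPrefixOf_iff_prefix.mp hpre
            apply h3
            constructor
            · simp
            · rcases hx with rfl | rfl | rfl | rfl <;> simp [pvGALLOWS_TRI]
          rw [pvR_c_cons t (hno 'p' (by simp)) (hno 'f' (by simp)) (hno 't' (by simp)) (hno 'k' (by simp))]
        · rw [pvR_cons_ne c t hc]
termination_by s.length
decreasing_by all_goals ((try subst t); simp; try omega)

-- ===== VERDICT (by name: the statement is the Claim_ definition above) =====
theorem collapse_compound_to_simple_spec : Claim_equal_collapse_compound_to_simple := by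
  intro word _
  unfold Spec_collapse_compound_to_simple
  apply String.toList_inj.mp
  unfold collapse_compound_to_simple collapse_compound_to_simple_alt pvEvaToGlyphs
  simp only [List.foldl_cons, List.foldl_nil, String.toList_ofList, PySem.Str.toList_replace,
    PySem.Str.toList_lower]
  rw [replace_eq_pvRwg _ _ _ (by decide), replace_eq_pvRwg _ _ _ (by decide),
      replace_eq_pvRwg _ _ _ (by decide), replace_eq_pvRwg _ _ _ (by decide)]
  rw [fold_eq_flatMap_pvF2, List.nil_append, join_nil_flatten, eva_flat_eq_pvR]
  rw [show ("cph".toList : List Char) = ['c','p','h'] from rfl,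
      show ("pch".toList : List Char) = ['p','c','h'] from rfl,
      show ("cfh".toList : List Char) = ['c','f','h'] from rfl,
      show ("fch".toList : List Char) = ['f','c','h'] from rfl,
      show ("cth".toList : List Char) = ['c','t','h'] from rfl,
      show ("tch".toList : List Char) = ['t','c','h'] from rfl,
      show ("ckh".toList : List Char) = ['c','k','h'] from rfl,
      show ("kch".toList : List Char) = ['k','c','h'] from rfl]
  rw [show pvRwg ['c','k','h'] ['k','c','h']
        (pvRwg ['c','t','h'] ['t','c','h']
          (pvRwg ['c','f','h'] ['f','c','h']
            (pvRwg ['c','p','h'] ['p','c','h'] (PySem.Chars.lower word.toList))))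
      = pvRw1 'k' (pvRw1 't' (pvRw1 'f' (pvRw1 'p' (PySem.Chars.lower word.toList)))) from rfl]
  rw [comp_eq_pvR]
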